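-- pv_equiv track=rewrite | github.com/OliverAtondo/miCoach-Biohackers | backend/routes/exercises.py | _strip_stub_js
-- ===== SOURCE A (Python) =====
-- def _strip_stub_js(test_runner: str) -> str:
--     """Remove stub function from JS test runner."""
--     lines = test_runner.split("\n")
--     result, brace_depth, in_stub = [], 0, False
--     for line in lines:
--         if not in_stub and ("function " in line or "const " in line or "let " in line) and "{" in line:
--             if "// stub" in line or "// placeholder" in line:
--                 in_stub = True
--                 brace_depth = line.count("{") - line.count("}")
--                 continue
--         if in_stub:
--             brace_depth += line.count("{") - line.count("}")
--             if brace_depth <= 0: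
--                 in_stub = False
--             continue
--         result.append(line)
--     return "\n".join(result)
-- ===== SOURCE B (Python) =====
-- def _strip_stub_js(test_runner: str) -> str:
--     """Remove stub function from JS test runner."""
--     lines = test_runner.split("\n")
--     # pass 1: annotate each line with the cumulative brace balance before and after it
--     triples = []
--     bal = 0
--     for line in lines:
--         nxt = bal + line.count("{") - line.count("}")
--         triples.append((line, bal, nxt))
--         bal = nxt
--     # pass 2: keep lines; a stub region ends at the first later line whose
--     # precomputed after-balance drops back to the stub line's before-balance
--     result = []
--     i, n = 0, len(triples)
--     while i < n:
--         line, before, _ = triples[i]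
--         if (("function " in line or "const " in line or "let " in line)
--                 and "{" in line
--                 and ("// stub" in line or "// placeholder" in line)):
--             i += 1
--             while i < n and triples[i][2] > before:
--                 i += 1
--             i += 1
--         else:
--             result.append(line)
--             i += 1
--     return "\n".join(result)
-- ===== Notes on version B (the rewrite author's own statement) =====
-- stated objective: alternative
-- what changed: Replaces A's single pass with a running brace counter and an in_stub flag by two staged passes: a first pass annotates every line with its cumulative brace balance before/after, and a second pass keeps lines, ending a stub region at the first later line whose precomputed after-balance falls back to the stub line's before-balance (no counter or flag in the selection pass).
import Mathlib
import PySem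

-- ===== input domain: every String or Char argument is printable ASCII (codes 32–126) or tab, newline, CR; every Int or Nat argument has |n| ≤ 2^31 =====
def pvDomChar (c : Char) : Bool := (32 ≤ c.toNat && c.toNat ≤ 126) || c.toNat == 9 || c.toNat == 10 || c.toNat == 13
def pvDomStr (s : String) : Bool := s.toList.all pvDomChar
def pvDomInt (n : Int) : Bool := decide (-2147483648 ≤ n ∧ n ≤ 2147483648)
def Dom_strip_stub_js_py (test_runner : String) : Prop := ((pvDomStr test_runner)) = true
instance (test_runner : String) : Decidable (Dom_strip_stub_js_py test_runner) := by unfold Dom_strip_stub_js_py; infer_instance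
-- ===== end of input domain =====

-- B replaces A's running counter/flag pass by two staged passes (prefix brace balances, then
-- selection by comparing precomputed balances); same O(n), stated as 'alternative'.

-- shared by both ports: the literal stub-start test and the brace delta of one line
def pvStubStart (line : String) : Bool :=
  (PySem.Str.isIn "function " line || PySem.Str.isIn "const " line || PySem.Str.isIn "let " line)
    && PySem.Str.isIn "{" line
    && (PySem.Str.isIn "// stub" line || PySem.Str.isIn "// placeholder" line)

def pvDelta (line : String) : Int :=
  (PySem.Str.count line "{" : Int) - (PySem.Str.count line "}" : Int)

-- ===== PORT A =====
-- A's loop body: state = (result, brace_depth, in_stub); the 'decl and { but no marker'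
-- case of A falls through to the append branch, which the flattened condition reproduces.
def aStep (acc : List String × Int × Bool) (line : String) : List String × Int × Bool :=
  let result := acc.1
  let brace_depth := acc.2.1
  let in_stub := acc.2.2
  if !in_stub && pvStubStart line then
    (result, pvDelta line, true)
  else if in_stub then
    let d := brace_depth + pvDelta line
    (result, d, if d ≤ 0 then false else true)
  else
    (result ++ [line], brace_depth, in_stub)

def strip_stub_js_py (test_runner : String) : String :=
  let lines := (PySem.Str.split? test_runner "\n").getD []
  PySem.Str.join "\n" (lines.foldl aStep ([], 0, false)).1

-- ===== PORT B =====
-- pass 1: annotate each line with the cumulative brace balance before and after it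
def pvAnnot : Int → List String → List (String × Int × Int)
  | _, [] => []
  | bal, l :: rest =>
    let nxt := bal + pvDelta l
    (l, bal, nxt) :: pvAnnot nxt rest

-- pass 2, inner while: drop annotated lines while their after-balance stays above the base
def bSkip : Int → List (String × Int × Int) → List (String × Int × Int)
  | _, [] => []
  | base, (_, _, pa) :: rest => if pa > base then bSkip base rest else rest

theorem bSkip_length_le (base : Int) (xs : List (String × Int × Int)) :
    (bSkip base xs).length ≤ xs.length := by
  induction xs with
  | nil => simp [bSkip]
  | cons x rest ih =>
    simp only [bSkip]
    split
    · exact Nat.le_succ_of_le ih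
    · simp

-- pass 2, outer loop over the annotated lines
def bGo : List (String × Int × Int) → List String
  | [] => []
  | (l, pb, _) :: rest =>
    if pvStubStart l then bGo (bSkip pb rest)
    else l :: bGo rest
termination_by xs => xs.length
decreasing_by
  · exact Nat.lt_succ_of_le (bSkip_length_le _ _)
  · simp

def strip_stub_js_py_alt (test_runner : String) : String :=
  PySem.Str.join "\n" (bGo (pvAnnot 0 ((PySem.Str.split? test_runner "\n").getD [])))

-- ===== PRECONDITION & SPEC =====
def Spec_strip_stub_js_py (test_runner : String) (out : String) : Prop := out = strip_stub_js_py_alt test_runner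
instance (test_runner : String) (out : String) : Decidable (Spec_strip_stub_js_py test_runner out) := by unfold Spec_strip_stub_js_py; infer_instance

-- ===== CLAIM (what is proved, stated in full; the proofs are below) =====
def Claim_equal_strip_stub_js_py : Prop := ∀ (test_runner : String), Dom_strip_stub_js_py test_runner → Spec_strip_stub_js_py test_runner (strip_stub_js_py test_runner)

-- ===== LEMMAS AND PROOFS =====

-- proof-only middle form of the computation: A's flag-based fold expressed as a skip loop
def altSkip : Int → List String → List String
  | _, [] => []
  | depth, l :: rest =>
    let d := depth + pvDelta l
    if d ≤ 0 then rest else altSkip d rest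

theorem altSkip_length_le (d : Int) (xs : List String) : (altSkip d xs).length ≤ xs.length := by
  induction xs generalizing d with
  | nil => simp [altSkip]
  | cons l rest ih =>
    simp only [altSkip]
    split
    · simp
    · exact Nat.le_succ_of_le (ih _)

def altGo : List String → List String
  | [] => []
  | l :: rest =>
    if pvStubStart l then altGo (altSkip (pvDelta l) rest)
    else l :: altGo rest
termination_by xs => xs.length
decreasing_by
  · exact Nat.lt_succ_of_le (altSkip_length_le _ _)
  · simp

-- A's flat fold with the in_stub flag computes the skip-loop form
theorem fold_aStep_eq (lines res : List String) (d : Int) (b : Bool) :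
    (lines.foldl aStep (res, d, b)).1
      = res ++ (if b then altGo (altSkip d lines) else altGo lines) := by
  induction lines generalizing res d b with
  | nil => cases b <;> simp [altGo, altSkip]
  | cons l rest ih =>
    cases b with
    | false =>
      by_cases h : pvStubStart l = true
      · simp only [List.foldl_cons, aStep, h, Bool.not_false, Bool.true_and, ih, altGo]
        simp
      · simp only [List.foldl_cons, aStep, Bool.not_false, Bool.true_and, h, if_neg,
          Bool.false_eq_true, not_false_iff, ih, altGo]
        simp
    | true =>
      simp only [List.foldl_cons, aStep, Bool.not_true, Bool.false_and, Bool.false_eq_true,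
        if_false]
      by_cases hd : d + pvDelta l ≤ 0
      · simp only [if_pos hd, ih, altSkip]
        simp
      · simp only [if_neg hd, ih, altSkip]
        simp

-- skipping by comparison with precomputed balances = skipping with a running counter
theorem bSkip_annot (xs : List String) (s d : Int) :
    ∃ t, bSkip (s - d) (pvAnnot s xs) = pvAnnot t (altSkip d xs) := by
  induction xs generalizing s d with
  | nil => exact ⟨0, by simp [bSkip, altSkip, pvAnnot]⟩
  | cons l rest ih =>
    simp only [pvAnnot, bSkip, altSkip]
    by_cases hd : d + pvDelta l ≤ 0
    · have : ¬ (s + pvDelta l > s - d) := by omega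
      exact ⟨s + pvDelta l, by simp [this, hd]⟩
    · have h1 : s + pvDelta l > s - d := by omega
      have h2 : s - d = (s + pvDelta l) - (d + pvDelta l) := by ring
      obtain ⟨t, ht⟩ := ih (s + pvDelta l) (d + pvDelta l)
      exact ⟨t, by rw [if_pos h1, if_neg hd, h2, ht]⟩

-- B's selection pass over annotated lines = the skip-loop form, hence A's result
theorem bGo_annot : ∀ (n : Nat) (xs : List String), xs.length ≤ n →
    ∀ s : Int, bGo (pvAnnot s xs) = altGo xs := by
  intro n
  induction n with
  | zero =>
    intro xs h s
    have : xs = [] := List.length_eq_zero_iff.mp (Nat.le_zero.mp h)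
    simp [this, pvAnnot, bGo, altGo]
  | succ n ih =>
    intro xs h s
    cases xs with
    | nil => simp [pvAnnot, bGo, altGo]
    | cons l rest =>
      simp only [pvAnnot, bGo, altGo]
      by_cases hs : pvStubStart l = true
      · simp only [hs, if_true]
        obtain ⟨t, ht⟩ := bSkip_annot rest (s + pvDelta l) (pvDelta l)
        rw [show s + pvDelta l - pvDelta l = s from by ring] at ht
        rw [ht]
        exact ih _ (le_trans (altSkip_length_le _ _) (Nat.lt_succ_iff.mp h)) t
      · simp only [hs, Bool.false_eq_true, if_false]
        rw [ih rest (Nat.lt_succ_iff.mp h) (s + pvDelta l)]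

-- ===== VERDICT (by name: the statement is the Claim_ definition above) =====
theorem strip_stub_js_py_spec : Claim_equal_strip_stub_js_py := by
  intro s _
  unfold Spec_strip_stub_js_py strip_stub_js_py strip_stub_js_py_alt
  simp only [fold_aStep_eq, bGo_annot _ _ (le_refl _) 0]
  simp
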